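-- pv_equiv track=rewrite | github.com/camargodev/advent-of-code-2023 | day-10/src/part_2/loop_inner_size_calculator.py | count_pipes_before
-- ===== SOURCE A (Python) =====
-- def count_pipes_before(row, row_idx, max_col_idx, loop_nodes):
--     pipes_before = 0
--     for col_idx, col in enumerate(row):
--         if col_idx >= max_col_idx:
--             continue
--         if (row_idx, col_idx) in loop_nodes:
--             pipes_before +=1
--     return pipes_before
-- ===== SOURCE B (Python) =====
-- def count_pipes_before(row, row_idx, max_col_idx, loop_nodes):
--     n = len(row)
--     cols = {c for (r, c) in loop_nodes if r == row_idx and 0 <= c < n and c < max_col_idx}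
--     return len(cols)
-- ===== Notes on version B (the rewrite author's own statement) =====
-- stated objective: alternative
-- what changed: B inverts which collection drives the loop: instead of scanning every column of row and testing membership in loop_nodes, it filters loop_nodes once for nodes of this row inside [0, min(len(row), max_col_idx)) and returns the size of the resulting set of columns.
import Mathlib
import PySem

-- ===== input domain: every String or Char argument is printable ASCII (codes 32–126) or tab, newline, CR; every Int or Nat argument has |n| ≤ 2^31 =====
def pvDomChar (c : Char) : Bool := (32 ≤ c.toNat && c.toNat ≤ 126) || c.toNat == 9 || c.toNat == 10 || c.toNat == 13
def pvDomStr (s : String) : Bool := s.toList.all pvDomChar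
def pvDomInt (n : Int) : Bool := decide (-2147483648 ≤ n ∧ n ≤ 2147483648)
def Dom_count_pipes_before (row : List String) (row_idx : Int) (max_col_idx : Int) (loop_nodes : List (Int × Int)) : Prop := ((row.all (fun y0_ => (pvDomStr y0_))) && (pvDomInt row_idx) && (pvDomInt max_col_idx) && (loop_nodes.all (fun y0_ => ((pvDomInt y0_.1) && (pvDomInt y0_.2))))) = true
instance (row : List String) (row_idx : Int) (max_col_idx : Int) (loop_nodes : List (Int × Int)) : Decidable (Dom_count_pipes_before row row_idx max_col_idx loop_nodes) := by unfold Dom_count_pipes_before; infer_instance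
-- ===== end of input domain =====

-- B inverts which collection drives the loop: it filters loop_nodes for this row's
-- in-window columns and returns the size of that set, instead of scanning row's columns.

-- ===== PORT A =====
def count_pipes_before (row : List String) (row_idx : Int) (max_col_idx : Int) (loop_nodes : List (Int × Int)) : Int :=
  (PySem.List.enumerate row).foldl (fun pipes_before p =>
    if p.1 ≥ max_col_idx then pipes_before
    else if (row_idx, p.1) ∈ loop_nodes then pipes_before + 1
    else pipes_before) 0

-- ===== PORT B =====
def count_pipes_before_alt (row : List String) (row_idx : Int) (max_col_idx : Int) (loop_nodes : List (Int × Int)) : Int :=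
  let n : Int := row.length
  let cols : PySem.Set Int := PySem.Set.ofList (loop_nodes.filterMap (fun p =>
    if p.1 = row_idx ∧ 0 ≤ p.2 ∧ p.2 < n ∧ p.2 < max_col_idx then some p.2 else none))
  PySem.Set.len cols

-- ===== PRECONDITION & SPEC =====
def Spec_count_pipes_before (row : List String) (row_idx : Int) (max_col_idx : Int) (loop_nodes : List (Int × Int)) (out : Int) : Prop := out = count_pipes_before_alt row row_idx max_col_idx loop_nodes
instance (row : List String) (row_idx : Int) (max_col_idx : Int) (loop_nodes : List (Int × Int)) (out : Int) : Decidable (Spec_count_pipes_before row row_idx max_col_idx loop_nodes out) := by unfold Spec_count_pipes_before; infer_instance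

-- ===== CLAIM (what is proved, stated in full; the proofs are below) =====
def Claim_equal_count_pipes_before : Prop := ∀ (row : List String) (row_idx : Int) (max_col_idx : Int) (loop_nodes : List (Int × Int)), Dom_count_pipes_before row row_idx max_col_idx loop_nodes → Spec_count_pipes_before row row_idx max_col_idx loop_nodes (count_pipes_before row row_idx max_col_idx loop_nodes)

-- ===== LEMMAS AND PROOFS =====

-- A's loop is an accumulator form of countP over the enumerated list.
theorem foldA_eq_countP (max_col_idx row_idx : Int) (loop_nodes : List (Int × Int))
    (l : List (Int × String)) (acc : Int) :
    l.foldl (fun pipes_before p =>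
      if p.1 ≥ max_col_idx then pipes_before
      else if (row_idx, p.1) ∈ loop_nodes then pipes_before + 1
      else pipes_before) acc
    = acc + (l.countP (fun p => decide (p.1 < max_col_idx) && decide ((row_idx, p.1) ∈ loop_nodes))) := by
  induction l generalizing acc with
  | nil => simp
  | cons x xs ih =>
      simp only [List.foldl_cons, List.countP_cons, ih]
      by_cases h1 : x.1 ≥ max_col_idx
      · have : ¬ x.1 < max_col_idx := by omega
        simp [h1, this]
      · have h1' : x.1 < max_col_idx := by omega
        by_cases h2 : (row_idx, x.1) ∈ loop_nodes
        · simp [h1, h1', h2]; omega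
        · simp [h1, h1', h2]

-- membership in B's filtered column list
theorem mem_filtered (row : List String) (row_idx max_col_idx : Int) (loop_nodes : List (Int × Int)) (c : Int) :
    c ∈ loop_nodes.filterMap (fun p =>
        if p.1 = row_idx ∧ 0 ≤ p.2 ∧ p.2 < (row.length : Int) ∧ p.2 < max_col_idx then some p.2 else none)
    ↔ ((row_idx, c) ∈ loop_nodes ∧ 0 ≤ c ∧ c < (row.length : Int) ∧ c < max_col_idx) := by
  simp only [List.mem_filterMap]
  constructor
  · rintro ⟨p, hp, hf⟩
    by_cases h : p.1 = row_idx ∧ 0 ≤ p.2 ∧ p.2 < (row.length : Int) ∧ p.2 < max_col_idx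
    · rw [if_pos h] at hf
      obtain ⟨h1, h2, h3, h4⟩ := h
      cases hf
      exact ⟨by rw [← h1]; exact hp, h2, h3, h4⟩
    · rw [if_neg h] at hf; cases hf
  · rintro ⟨hmem, h2, h3, h4⟩
    exact ⟨(row_idx, c), hmem, by simp [h2, h3, h4]⟩

theorem count_eq (row : List String) (row_idx max_col_idx : Int) (loop_nodes : List (Int × Int)) :
    count_pipes_before row row_idx max_col_idx loop_nodes
    = count_pipes_before_alt row row_idx max_col_idx loop_nodes := by
  unfold count_pipes_before count_pipes_before_alt
  rw [foldA_eq_countP]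
  -- left side: count over enumerate only depends on the index component
  have hfst := PySem.List.map_fst_enumerate row (0 : Int)
  rw [zero_add]
  set q : Int → Bool := fun i => decide (i < max_col_idx) && decide ((row_idx, i) ∈ loop_nodes) with hq
  have hcount : (PySem.List.enumerate row 0).countP
      (fun p => decide (p.1 < max_col_idx) && decide ((row_idx, p.1) ∈ loop_nodes))
      = (PySem.List.pyRange 0 ((0:Int) + row.length) 1).countP q := by
    rw [← hfst, List.countP_map]; rfl
  rw [hcount]
  -- both sides are lengths of nodup lists with the same membership
  set fl := loop_nodes.filterMap (fun p =>
      if p.1 = row_idx ∧ 0 ≤ p.2 ∧ p.2 < ((row.length : Int)) ∧ p.2 < max_col_idx then some p.2 else none) with hfl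
  have hnodupL : ((PySem.List.pyRange 0 ((0:Int) + row.length) 1).filter q).Nodup :=
    List.Nodup.filter q (PySem.List.nodup_pyRange_one 0 ((0:Int) + row.length))
  have hnodupR : (PySem.Set.ofList fl).Nodup := PySem.Set.nodup_ofList fl
  have hmemiff : ∀ c : Int,
      c ∈ (PySem.List.pyRange 0 ((0:Int) + row.length) 1).filter q ↔ c ∈ PySem.Set.ofList fl := by
    intro c
    rw [List.mem_filter, PySem.List.mem_pyRange_one, PySem.Set.mem_ofList, hfl, mem_filtered]
    simp only [hq, Bool.and_eq_true, decide_eq_true_eq]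
    constructor
    · rintro ⟨⟨h0, h1⟩, h2, h3⟩
      exact ⟨h3, h0, by omega, h2⟩
    · rintro ⟨h3, h0, h1, h2⟩
      exact ⟨⟨h0, by omega⟩, h2, h3⟩
  have hperm : List.Perm ((PySem.List.pyRange 0 ((0:Int) + row.length) 1).filter q) (PySem.Set.ofList fl) :=
    (List.perm_ext_iff_of_nodup hnodupL hnodupR).mpr hmemiff
  have hlen := hperm.length_eq
  rw [← List.countP_eq_length_filter] at hlen
  rw [hfl] at hlen
  simp only [PySem.Set.len]
  omega

-- ===== VERDICT (by name: the statement is the Claim_ definition above) =====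
theorem count_pipes_before_spec : Claim_equal_count_pipes_before := by
  intro row row_idx max_col_idx loop_nodes _
  unfold Spec_count_pipes_before
  exact count_eq row row_idx max_col_idx loop_nodes
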